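-- pv_equiv track=rewrite | github.com/janek37/advent-of-code | 2024/day06.py | make_jumps
-- ===== SOURCE A (Python) =====
-- from typing import Iterator, Sequence
--
-- def make_jumps(line: Sequence[str], direction: int) -> list[int | None]:
--     jumps = [None] * len(line)
--     last_dest = None
--     was_wall = False
--     i = len(line) - 1 if direction == 1 else 0
--     while 0 <= i < len(line):
--         if was_wall:
--             last_dest = i
--         jumps[i] = last_dest
--         was_wall = line[i] == '#'
--         i -= direction
--     return jumps
-- ===== SOURCE B (Python) =====
-- from typing import Iterator, Sequence
--
-- def make_jumps(line: Sequence[str], direction: int) -> list: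
--     n = len(line)
--     jumps = [None] * n
--     if n == 0:
--         return jumps
--     start = n - 1 if direction == 1 else 0
--     stop = -1 if direction > 0 else n
--     visited = list(range(start, stop, -direction))
--     # split the visited cells into chunks, each chunk ending at a wall
--     chunks = []
--     cur = []
--     for v in visited:
--         cur.append(v)
--         if line[v] == '#':
--             chunks.append(cur)
--             cur = []
--     chunks.append(cur)
--     # every chunk after the first starts just past a wall: all its cells jump
--     # to its first cell; the first chunk (before any wall) keeps None
--     for chunk in chunks[1:]:
--         for v in chunk:
--             jumps[v] = chunk[0]
--     return jumps
-- ===== Notes on version B (the rewrite author's own statement) =====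
-- stated objective: alternative
-- what changed: B builds the explicit list of visited cells with range(), splits it into wall-terminated chunks, and fills every chunk after the first with its first cell, instead of A's single index-stepping while loop carrying was_wall/last_dest flags.
import Mathlib
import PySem

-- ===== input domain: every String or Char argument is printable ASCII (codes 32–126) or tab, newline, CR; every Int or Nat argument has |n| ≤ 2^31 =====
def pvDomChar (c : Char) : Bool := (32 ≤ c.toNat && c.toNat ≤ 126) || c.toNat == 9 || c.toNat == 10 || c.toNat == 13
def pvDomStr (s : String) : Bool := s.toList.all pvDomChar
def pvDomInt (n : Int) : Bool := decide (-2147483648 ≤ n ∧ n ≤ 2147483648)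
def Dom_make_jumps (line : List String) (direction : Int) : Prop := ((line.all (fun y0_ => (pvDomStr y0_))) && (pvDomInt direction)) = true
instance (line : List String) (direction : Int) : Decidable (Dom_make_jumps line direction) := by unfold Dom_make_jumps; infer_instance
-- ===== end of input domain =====

-- B replaces A's running was_wall/last_dest flags by an explicit visited range split
-- into wall-terminated chunks, each chunk after the first filled with its first cell
-- (objective: alternative decomposition, same cost; return-value equivalence only).

-- ===== PORT A =====
-- Python's while loop, fueled for totality: line.length + 1 bounds the number of
-- iterations whenever direction ≠ 0 (each step moves i by |direction| ≥ 1), and for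
-- direction = 0 the only input Pre_ admits is line = [], where the guard fails at once.
def mjA_loop (line : List String) (direction : Int) :
    Nat → Int → Option Int → Bool → List (Option Int) → List (Option Int)
  | 0, _, _, _, js => js
  | fuel+1, i, ld, ww, js =>
    if 0 ≤ i ∧ i < (line.length : Int) then
      let ld' := if ww then some i else ld
      -- i is in range here, so pyGetD is exact for line[i]; jumps[i] = ld' with 0 ≤ i
      mjA_loop line direction fuel (i - direction) ld'
        (PySem.List.pyGetD line i "" == "#") (js.set i.toNat ld')
    else js

def make_jumps (line : List String) (direction : Int) : List (Option Int) :=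
  mjA_loop line direction (line.length + 1)
    (if direction == 1 then (line.length : Int) - 1 else 0) none false
    (List.replicate line.length none)

-- ===== PORT B =====
def make_jumps_alt (line : List String) (direction : Int) : List (Option Int) :=
  let n := line.length
  let jumps : List (Option Int) := List.replicate n none
  if n = 0 then jumps
  else
    let start : Int := if direction == 1 then (n : Int) - 1 else 0
    let stop : Int := if direction > 0 then -1 else (n : Int)
    let visited := PySem.List.pyRange start stop (-direction)
    -- split the visited cells into chunks, each chunk ending at a wall
    let p := visited.foldl
      (fun (st : List (List Int) × List Int) v =>
        let cur := st.2 ++ [v]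
        -- v ∈ visited is in range, so pyGetD is exact for line[v]
        if PySem.List.pyGetD line v "" == "#" then (st.1 ++ [cur], ([] : List Int))
        else (st.1, cur))
      (([] : List (List Int)), ([] : List Int))
    let chunks := p.1 ++ [p.2]
    -- every chunk after the first starts just past a wall: all its cells jump to
    -- its first cell chunk[0]; the first chunk (before any wall) keeps None
    (chunks.drop 1).foldl
      (fun js chunk =>
        chunk.foldl (fun js v => js.set v.toNat (some (PySem.List.pyGetD chunk 0 0))) js)
      jumps

-- ===== PRECONDITION & SPEC =====
-- Pre_ excludes direction = 0 with a nonempty line: there Python A loops forever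
-- (i -= 0 never leaves the range), so A returns on no such input.
def Pre_make_jumps (line : List String) (direction : Int) : Prop :=
  direction ≠ 0 ∨ line = []
instance (line : List String) (direction : Int) : Decidable (Pre_make_jumps line direction) := by
  unfold Pre_make_jumps; infer_instance

def pvWitness_make_jumps : List String × Int := ([".", "#", ".", "."], 1)

def Spec_make_jumps (line : List String) (direction : Int) (out : List (Option Int)) : Prop := out = make_jumps_alt line direction
instance (line : List String) (direction : Int) (out : List (Option Int)) : Decidable (Spec_make_jumps line direction out) := by unfold Spec_make_jumps; infer_instance

-- ===== CLAIM (what is proved, stated in full; the proofs are below) =====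
def Claim_equal_make_jumps : Prop := ∀ (line : List String) (direction : Int), Dom_make_jumps line direction → Pre_make_jumps line direction → Spec_make_jumps line direction (make_jumps line direction)

-- ===== LEMMAS AND PROOFS =====

-- reference processor for A's loop body, driven by the list of visited cells
def mjProc (line : List String) :
    List Int → Option Int → Bool → List (Option Int) → List (Option Int)
  | [], _, _, js => js
  | v :: vs, ld, ww, js =>
    let ld' := if ww then some v else ld
    mjProc line vs ld' (PySem.List.pyGetD line v "" == "#") (js.set v.toNat ld')

-- specification of B's chunk-splitting fold
def mjChunks (line : List String) : List Int → List (List Int)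
  | [] => [[]]
  | v :: vs =>
    if PySem.List.pyGetD line v "" == "#" then [v] :: mjChunks line vs
    else
      match mjChunks line vs with
      | [] => [[v]]
      | c :: cs => (v :: c) :: cs

def mjFillChunk (chunk : List Int) (js : List (Option Int)) : List (Option Int) :=
  chunk.foldl (fun js v => js.set v.toNat (some (PySem.List.pyGetD chunk 0 0))) js

def mjFillAll (cs : List (List Int)) (js : List (Option Int)) : List (Option Int) :=
  cs.foldl (fun js chunk => mjFillChunk chunk js) js

def mjSetAll (o : Option Int) (xs : List Int) (js : List (Option Int)) : List (Option Int) :=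
  xs.foldl (fun js x => js.set x.toNat o) js

theorem mjChunks_ne_nil (line : List String) (vs : List Int) : mjChunks line vs ≠ [] := by
  induction vs with
  | nil => simp [mjChunks]
  | cons v vs ih =>
    simp only [mjChunks]
    split
    · simp
    · split
      · simp
      · simp

theorem mjFillChunk_cons (v : Int) (c : List Int) (js : List (Option Int)) :
    mjFillChunk (v :: c) js = mjSetAll (some v) (v :: c) js := by
  simp [mjFillChunk, mjSetAll, PySem.List.pyGetD]

theorem mem_head_chunk (line : List String) (vs : List Int) :
    ∀ (c : List Int) (cs : List (List Int)),
    mjChunks line vs = c :: cs → ∀ x ∈ c, x ∈ vs := by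
  induction vs with
  | nil =>
    intro c cs h x hx
    simp only [mjChunks, List.cons_eq_cons] at h
    rw [← h.1] at hx; simp at hx
  | cons v vs ih =>
    intro c cs h x hx
    simp only [mjChunks] at h
    split at h
    · rw [List.cons_eq_cons] at h
      simp [← h.1] at hx; simp [hx]
    · split at h
      · rw [List.cons_eq_cons] at h
        simp [← h.1] at hx; simp [hx]
      · rename_i c' cs' hc
        rw [List.cons_eq_cons] at h
        rcases h with ⟨h1, h2⟩
        subst h1
        rcases List.mem_cons.mp hx with h | h
        · simp [h]
        · exact List.mem_cons_of_mem _ (ih c' cs' hc x h)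

-- the main correspondence: A's flag-driven scan = B's chunk fills
theorem mjProc_eq_fill (line : List String) (vs : List Int) :
    (∀ (ld : Option Int) (js : List (Option Int)) (c : List Int) (cs : List (List Int)),
        mjChunks line vs = c :: cs →
        mjProc line vs ld false js = mjFillAll cs (mjSetAll ld c js)) ∧
    (∀ (ld : Option Int) (js : List (Option Int)),
        mjProc line vs ld true js = mjFillAll (mjChunks line vs) js) := by
  induction vs with
  | nil =>
    constructor
    · intro ld js c cs h
      simp only [mjChunks, List.cons_eq_cons] at h
      rw [mjProc, ← h.1, ← h.2]
      rfl
    · intro ld js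
      rw [mjProc, mjChunks]
      rfl
  | cons v vs ih =>
    constructor
    · intro ld js c cs h
      simp only [mjChunks] at h
      rw [mjProc]
      simp only [if_neg (by simp : ¬ (false = true))]
      by_cases hw : (PySem.List.pyGetD line v "" == "#") = true
      · rw [if_pos hw, List.cons_eq_cons] at h
        rw [hw, ih.2 ld (js.set v.toNat ld), ← h.2]
        rw [← h.1]
        rfl
      · rw [if_neg hw] at h
        rcases hc : mjChunks line vs with _ | ⟨c', cs'⟩
        · exact absurd hc (mjChunks_ne_nil line vs)
        · rw [hc, List.cons_eq_cons] at h
          rw [(Bool.not_eq_true _).mp hw, ih.1 ld (js.set v.toNat ld) c' cs' hc, ← h.1, ← h.2]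
          rfl
    · intro ld js
      rw [mjProc]
      simp only [mjChunks, reduceIte]
      by_cases hw : (PySem.List.pyGetD line v "" == "#") = true
      · rw [if_pos hw, hw, ih.2 (some v) (js.set v.toNat (some v))]
        rfl
      · rw [if_neg hw, (Bool.not_eq_true _).mp hw]
        rcases hc : mjChunks line vs with _ | ⟨c', cs'⟩
        · exact absurd hc (mjChunks_ne_nil line vs)
        · rw [ih.1 (some v) (js.set v.toNat (some v)) c' cs' hc]
          show _ = mjFillAll cs' (mjFillChunk (v :: c') js)
          rw [mjFillChunk_cons]
          rfl

-- B's splitting fold computes mjChunks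
theorem mjSplit_eq_chunks (line : List String) (vs : List Int) :
    ∀ (cs0 : List (List Int)) (cur0 : List Int),
      (vs.foldl
        (fun (st : List (List Int) × List Int) v =>
          if PySem.List.pyGetD line v "" == "#" then (st.1 ++ [st.2 ++ [v]], ([] : List Int))
          else (st.1, st.2 ++ [v]))
        (cs0, cur0)).1 ++ [(vs.foldl
        (fun (st : List (List Int) × List Int) v =>
          if PySem.List.pyGetD line v "" == "#" then (st.1 ++ [st.2 ++ [v]], ([] : List Int))
          else (st.1, st.2 ++ [v]))
        (cs0, cur0)).2] =
      cs0 ++ (match mjChunks line vs with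
              | [] => [cur0]
              | c :: cs => (cur0 ++ c) :: cs) := by
  induction vs with
  | nil => intro cs0 cur0; simp [mjChunks]
  | cons v vs ih =>
    intro cs0 cur0
    simp only [List.foldl_cons, mjChunks]
    by_cases hw : (PySem.List.pyGetD line v "" == "#") = true
    · simp only [hw, if_true]
      rw [ih (cs0 ++ [cur0 ++ [v]]) []]
      rcases hc : mjChunks line vs with _ | ⟨c, cs⟩
      · exact absurd hc (mjChunks_ne_nil line vs)
      · simp
    · simp only [Bool.not_eq_true] at hw
      simp only [hw, Bool.false_eq_true, if_false]
      rw [ih cs0 (cur0 ++ [v])]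
      rcases hc : mjChunks line vs with _ | ⟨c, cs⟩
      · exact absurd hc (mjChunks_ne_nil line vs)
      · simp

-- writing none over a cell that already holds none is a no-op
theorem set_none_self (js : List (Option Int)) (k : Nat) (h : js[k]? = some none) :
    js.set k none = js := by
  apply List.ext_getElem? ; intro i
  by_cases hi : i = k
  · subst hi
    have hlen : i < js.length := by
      by_contra hl
      rw [List.getElem?_eq_none (by omega)] at h; simp at h
    have h2 : js[i] = none := by simpa [List.getElem?_eq_getElem hlen] using h
    simp [hlen, h2]
  · simp [List.getElem?_set_ne (by omega : k ≠ i)]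

theorem mjSetAll_none (xs : List Int) (js : List (Option Int))
    (h : ∀ x ∈ xs, js[x.toNat]? = some none) : mjSetAll none xs js = js := by
  induction xs generalizing js with
  | nil => rfl
  | cons x xs ih =>
    have h1 := h x (by simp)
    simp only [mjSetAll, List.foldl_cons, set_none_self js x.toNat h1]
    exact ih js (fun y hy => h y (by simp [hy]))

-- pyRange with a general step: nil and cons unfoldings, plus membership bounds
theorem pyRange_nil_pos (a b s : Int) (hs : 0 < s) (h : b ≤ a) :
    PySem.List.pyRange a b s = [] := by
  simp [PySem.List.pyRange, hs.ne', hs, not_lt.mpr h]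

theorem pyRange_nil_neg (a b s : Int) (hs : s < 0) (h : a ≤ b) :
    PySem.List.pyRange a b s = [] := by
  simp [PySem.List.pyRange, hs.ne, not_lt.mpr hs.le, not_lt.mpr h]

theorem pyRange_count_pos (a b s : Int) (hs : 0 < s) (h : a < b) :
    (if a + s < b then ((b - (a + s) + s - 1) / s).toNat else 0) + 1
      = ((b - a + s - 1) / s).toNat := by
  have hx : (0:Int) ≤ b - a - 1 := by omega
  have key : (b - a - 1 + 1 * s) / s = (b - a - 1) / s + 1 := Int.add_mul_ediv_right _ 1 hs.ne'
  have hnn : 0 ≤ (b - a - 1) / s := Int.ediv_nonneg hx hs.le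
  by_cases h2 : a + s < b
  · rw [if_pos h2]
    have e1 : b - (a + s) + s - 1 = b - a - 1 := by ring
    have e2 : b - a + s - 1 = b - a - 1 + 1 * s := by ring
    rw [e1, e2, key]
    omega
  · rw [if_neg h2]
    have hlt : b - a - 1 < s := by omega
    have hz : (b - a - 1) / s = 0 := Int.ediv_eq_zero_of_lt hx hlt
    have e2 : b - a + s - 1 = b - a - 1 + 1 * s := by ring
    rw [e2, key, hz]
    omega

theorem pyRange_cons_pos (a b s : Int) (hs : 0 < s) (h : a < b) :
    PySem.List.pyRange a b s = a :: PySem.List.pyRange (a + s) b s := by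
  simp only [PySem.List.pyRange, hs.ne', if_false, hs, if_true, if_pos h]
  rw [← pyRange_count_pos a b s hs h, List.range_succ_eq_map]
  simp [List.map_map, Function.comp_def]
  intro k _
  ring

theorem pyRange_cons_neg (a b s : Int) (hs : s < 0) (h : b < a) :
    PySem.List.pyRange a b s = a :: PySem.List.pyRange (a + s) b s := by
  have hcount := pyRange_count_pos (-a) (-b) (-s) (by omega) (by omega)
  simp only [PySem.List.pyRange, hs.ne, if_false, not_lt.mpr hs.le, if_pos h]
  have e1 : -b - (-a + -s) + -s - 1 = a + s - b + -s - 1 := by ring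
  have e2 : -b - -a + -s - 1 = a - b + -s - 1 := by ring
  have e3 : (-a + -s < -b) ↔ (b < a + s) := by omega
  rw [e1, e2] at hcount
  simp only [e3] at hcount
  rw [← hcount, List.range_succ_eq_map]
  simp [List.map_map, Function.comp_def]
  intro k _
  ring

theorem mem_pyRange_neg (a b s x : Int) (hs : s < 0) (hx : x ∈ PySem.List.pyRange a b s) :
    b < x ∧ x ≤ a := by
  simp only [PySem.List.pyRange, hs.ne, if_false, not_lt.mpr hs.le] at hx
  by_cases h : b < a
  · rw [if_pos h] at hx
    simp only [List.mem_map, List.mem_range] at hx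
    obtain ⟨k, hk, rfl⟩ := hx
    set t := -s with ht
    have htpos : 0 < t := by omega
    have hk' : (k : Int) + 1 ≤ (a - b + t - 1) / t := by
      have : (k : Int) < ((a - b + t - 1) / t).toNat := by exact_mod_cast hk
      omega
    have hmul := (Int.le_ediv_iff_mul_le htpos).mp hk'
    have hkt : (k : Int) * t ≤ a - b - 1 := by nlinarith
    constructor
    · nlinarith
    · have : s * (k : Int) ≤ 0 := mul_nonpos_of_nonpos_of_nonneg hs.le (by positivity)
      omega
  · rw [if_neg h] at hx
    simp at hx

-- A's fueled loop equals the visited-list processor (downward, direction > 0)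
theorem mjA_loop_down (line : List String) (d : Int) (hd : 0 < d) :
    ∀ (fuel : Nat) (i : Int) (ld : Option Int) (ww : Bool) (js : List (Option Int)),
      i < (line.length : Int) → i + 1 ≤ (fuel : Int) →
      mjA_loop line d fuel i ld ww js = mjProc line (PySem.List.pyRange i (-1) (-d)) ld ww js := by
  intro fuel
  induction fuel with
  | zero =>
    intro i ld ww js hin hfuel
    rw [pyRange_nil_neg _ _ _ (by omega) (by omega : i ≤ -1)]
    rfl
  | succ fuel ih =>
    intro i ld ww js hin hfuel
    by_cases hi : 0 ≤ i
    · rw [pyRange_cons_neg _ _ _ (by omega) (by omega : -1 < i)]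
      rw [mjA_loop, if_pos ⟨hi, hin⟩, mjProc]
      have e : i + -d = i - d := by ring
      rw [e]
      exact ih (i - d) _ _ _ (by omega) (by push_cast at hfuel ⊢; omega)
    · rw [pyRange_nil_neg _ _ _ (by omega) (by omega : i ≤ -1)]
      rw [mjA_loop, if_neg (by omega)]
      rfl

-- A's fueled loop equals the visited-list processor (upward, direction < 0)
theorem mjA_loop_up (line : List String) (d : Int) (hd : d < 0) :
    ∀ (fuel : Nat) (i : Int) (ld : Option Int) (ww : Bool) (js : List (Option Int)),
      0 ≤ i → (line.length : Int) - i ≤ (fuel : Int) →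
      mjA_loop line d fuel i ld ww js = mjProc line (PySem.List.pyRange i (line.length : Int) (-d)) ld ww js := by
  intro fuel
  induction fuel with
  | zero =>
    intro i ld ww js hin hfuel
    rw [pyRange_nil_pos _ _ _ (by omega) (by push_cast at hfuel; omega)]
    rfl
  | succ fuel ih =>
    intro i ld ww js hin hfuel
    by_cases hi : i < (line.length : Int)
    · rw [pyRange_cons_pos _ _ _ (by omega) hi]
      rw [mjA_loop, if_pos ⟨hin, hi⟩, mjProc]
      have e : i + -d = i - d := by ring
      rw [e]
      exact ih (i - d) _ _ _ (by omega) (by push_cast at hfuel ⊢; omega)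
    · rw [pyRange_nil_pos _ _ _ (by omega) (by omega)]
      rw [mjA_loop, if_neg (by omega)]
      rfl


-- B's whole else-branch computes the tail-chunk fills
theorem mjB_fold_fill (line : List String) (vs : List Int) (js : List (Option Int)) :
    List.foldl
      (fun js chunk => List.foldl (fun js v => js.set v.toNat (some (PySem.List.pyGetD chunk 0 0))) js chunk)
      js
      (List.drop 1
        ((List.foldl (fun (st : List (List Int) × List Int) v =>
            if PySem.List.pyGetD line v "" == "#" then (st.1 ++ [st.2 ++ [v]], ([] : List Int))
            else (st.1, st.2 ++ [v])) ([], []) vs).1 ++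
         [(List.foldl (fun (st : List (List Int) × List Int) v =>
            if PySem.List.pyGetD line v "" == "#" then (st.1 ++ [st.2 ++ [v]], ([] : List Int))
            else (st.1, st.2 ++ [v])) ([], []) vs).2])) =
    mjFillAll (mjChunks line vs).tail js := by
  have hsplit := mjSplit_eq_chunks line vs [] []
  rcases hc : mjChunks line vs with _ | ⟨c, cs⟩
  · exact absurd hc (mjChunks_ne_nil line vs)
  · rw [hc] at hsplit
    simp only [List.nil_append] at hsplit
    rw [hsplit]
    rfl

-- processing the visited cells from an all-none board = B's chunk fills minus the first chunk
theorem mjProc_eq_tailfill (line : List String) (vs : List Int)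
    (hmem : ∀ x ∈ vs, 0 ≤ x ∧ x < (line.length : Int)) :
    mjProc line vs none false (List.replicate line.length none) =
      mjFillAll (mjChunks line vs).tail (List.replicate line.length none) := by
  rcases hc : mjChunks line vs with _ | ⟨c, cs⟩
  · exact absurd hc (mjChunks_ne_nil line vs)
  · rw [(mjProc_eq_fill line vs).1 none _ c cs hc]
    have hnone : ∀ x ∈ c, (List.replicate line.length (none : Option Int))[x.toNat]? = some none := by
      intro x hx
      have hxv := mem_head_chunk line vs c cs hc x hx
      have hb := hmem x hxv
      have : x.toNat < line.length := by omega
      simp [this]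
    rw [mjSetAll_none c _ hnone]
    rfl

-- ===== VERDICT (by name: the statement is the Claim_ definition above) =====
theorem make_jumps_spec : Claim_equal_make_jumps := by
  intro line d _hdom hpre
  unfold Spec_make_jumps
  rcases Nat.eq_zero_or_pos line.length with h0 | hn
  · have hl : line = [] := List.eq_nil_of_length_eq_zero h0
    subst hl
    by_cases hd1 : d == 1 <;> simp [make_jumps, make_jumps_alt, mjA_loop, hd1]
  · have hd0 : d ≠ 0 := by
      rcases hpre with h | h
      · exact h
      · rw [h] at hn; simp at hn
    have hnz : line.length ≠ 0 := by omega
    rcases lt_or_gt_of_ne hd0 with hneg | hpos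
    · -- direction < 0: the loop walks upward from 0
      have hidx : (if d == 1 then (line.length : Int) - 1 else 0) = 0 :=
        if_neg (show ¬((d == 1) = true) by simp; omega)
      have hstop : (if d > 0 then (-1 : Int) else (line.length : Int)) = (line.length : Int) :=
        if_neg (show ¬(d > 0) by omega)
      have hmem : ∀ x ∈ PySem.List.pyRange 0 (line.length : Int) (-d),
          0 ≤ x ∧ x < (line.length : Int) := by
        intro x hx
        have := (PySem.List.mem_pyRange_iff_of_pos (show (0:Int) < -d by omega) x).mp hx
        exact ⟨this.1, this.2.1⟩
      unfold make_jumps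
      rw [hidx, mjA_loop_up line d hneg (line.length + 1) 0 none false _ le_rfl
            (by push_cast; omega),
          mjProc_eq_tailfill line _ hmem]
      unfold make_jumps_alt
      simp only [if_neg hnz]
      rw [hidx, hstop, mjB_fold_fill]
    · -- direction > 0: the loop walks downward towards 0
      have hstop : (if d > 0 then (-1 : Int) else (line.length : Int)) = (-1 : Int) :=
        if_pos hpos
      have hlt : (if d == 1 then (line.length : Int) - 1 else 0) < (line.length : Int) := by
        split <;> omega
      have hmem : ∀ x ∈ PySem.List.pyRange (if d == 1 then (line.length : Int) - 1 else 0)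
          (-1) (-d), 0 ≤ x ∧ x < (line.length : Int) := by
        intro x hx
        have hb := mem_pyRange_neg _ _ _ x (show -d < 0 by omega) hx
        omega
      unfold make_jumps
      rw [mjA_loop_down line d hpos (line.length + 1) _ none false _ hlt
            (by split <;> (push_cast ; omega)),
          mjProc_eq_tailfill line _ hmem]
      unfold make_jumps_alt
      simp only [if_neg hnz]
      rw [hstop, mjB_fold_fill]
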